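-- pv_equiv track=rewrite | github.com/MarcinKonowalczyk/baba | golf/golfing_full.py | each_three
-- ===== SOURCE A (Python) =====
-- from collections import deque
--
-- def each_three(seq):
--     window = deque(maxlen=3)
--     i = 3
--     for _ in map(window.append, seq):
--         i -= 1
--         if not i:
--             i = 1
--             yield tuple(window)
-- ===== SOURCE B (Python) =====
-- from itertools import tee
--
-- def each_three(seq):
--     a, b, c = tee(seq, 3)
--     next(b, None)
--     next(c, None)
--     next(c, None)
--     yield from zip(a, b, c)
-- ===== Notes on version B (the rewrite author's own statement) =====
-- stated objective: idiomatic
-- what changed: Replaced the deque buffer with countdown counter by three tee'd iterators offset by 0/1/2 zipped together, the way the itertools recipes write a sliding window.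
import Mathlib
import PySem

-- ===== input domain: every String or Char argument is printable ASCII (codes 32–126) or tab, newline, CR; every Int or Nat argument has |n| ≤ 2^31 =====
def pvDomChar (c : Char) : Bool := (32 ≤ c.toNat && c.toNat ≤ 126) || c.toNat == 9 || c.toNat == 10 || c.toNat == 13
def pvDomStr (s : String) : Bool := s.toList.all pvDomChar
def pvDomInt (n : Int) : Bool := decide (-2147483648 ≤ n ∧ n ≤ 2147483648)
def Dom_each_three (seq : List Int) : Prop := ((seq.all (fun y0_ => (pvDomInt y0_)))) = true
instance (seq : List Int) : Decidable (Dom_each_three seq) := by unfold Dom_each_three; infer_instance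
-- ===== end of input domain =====

-- B replaces A's deque buffer + countdown counter with three offset cursors zipped together (idiomatic); return value only (A/B are generators, compared as lists).

-- ===== PORT A =====
-- the for-loop over seq with state (window deque, counter i, yielded output), step for step
def each_three_go (w : List Int) (i : Int) (seq : List Int) : List (List Int) :=
  match seq with
  | [] => []
  | x :: xs =>
    let w' := if w.length == 3 then w.drop 1 ++ [x] else w ++ [x]  -- deque(maxlen=3).append
    let i' := i - 1
    if i' == 0 then w' :: each_three_go w' 1 xs else each_three_go w' i' xs

def each_three (seq : List Int) : List (List Int) :=
  each_three_go [] 3 seq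

-- ===== PORT B =====
-- tee gives the same sequence thrice; next(b)/next(c,·,·) drop 1 and 2; zip = zipWith3 building the triples
def each_three_alt (seq : List Int) : List (List Int) :=
  List.zipWith3 (fun a b c => [a, b, c]) seq (seq.drop 1) (seq.drop 2)

-- ===== PRECONDITION & SPEC =====
def Spec_each_three (seq : List Int) (out : List (List Int)) : Prop := out = each_three_alt seq
instance (seq : List Int) (out : List (List Int)) : Decidable (Spec_each_three seq out) := by unfold Spec_each_three; infer_instance

-- ===== CLAIM (what is proved, stated in full; the proofs are below) =====
def Claim_equal_each_three : Prop := ∀ (seq : List Int), Dom_each_three seq → Spec_each_three seq (each_three seq)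

-- ===== LEMMAS AND PROOFS =====

-- steady state: window full, counter 1 → one yield per remaining element
theorem each_three_go_full (xs : List Int) : ∀ (a b c : Int),
    each_three_go [a, b, c] 1 xs
      = List.zipWith3 (fun a b c => [a, b, c]) (b :: c :: xs) (c :: xs) xs := by
  induction xs with
  | nil => intro a b c; rfl
  | cons d xs ih =>
    intro a b c
    simp only [each_three_go, List.length_cons, List.length_nil]
    norm_num
    simp only [List.zipWith3]
    exact congrArg _ (ih b c d)

-- ===== VERDICT (by name: the statement is the Claim_ definition above) =====
theorem each_three_spec : Claim_equal_each_three := by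
  intro seq _
  unfold Spec_each_three each_three each_three_alt
  match seq with
  | [] => rfl
  | [a] => rfl
  | [a, b] => rfl
  | a :: b :: c :: xs =>
    show each_three_go [] 3 (a :: b :: c :: xs) = _
    simp only [each_three_go, List.length_nil]
    norm_num
    simp only [List.zipWith3]
    exact congrArg _ (each_three_go_full xs a b c)
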